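-- pv_equiv track=rewrite | github.com/Allu-mette/QueensPuzzle | Scripts.py | IsFreeCase
-- ===== SOURCE A (Python) =====
-- def IsFreeCase(N, Q, Case):
--     for q in Q:
--         if q[0] == Case[0] or q[1] == Case[1]:
--             return False
--         for i in range(N):
--             if Case in [[q[0]+i, q[1]+i], [q[0]+i, q[1]-i], [q[0]-i, q[1]+i],[q[0]-i, q[1]-i]]:
--                 return False
--     return True
-- ===== SOURCE B (Python) =====
-- def IsFreeCase(N, Q, Case):
--     r, c = Case[0], Case[1]
--     return not any(q[0] == r or q[1] == c or
--                    (abs(r - q[0]) == abs(c - q[1]) and abs(r - q[0]) < N)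
--                    for q in Q)
-- ===== Notes on version B (the rewrite author's own statement) =====
-- stated objective: faster
-- what changed: Replaced the per-queen range(N) scan that materialises four candidate squares per step with a single closed-form arithmetic diagonal test (abs(dr)==abs(dc) and abs(dr)<N) inside one any() pass over the queens.
-- intended difference: On Case lists longer than 2 whose first two coordinates are diagonally attacked within distance N but lie on no queen's row or column, A returns True because its diagonal test compares the whole Case list against two-element lists and can never match, while B tests the first two coordinates arithmetically and returns False, the intended answer for an attacked square. — e.g. on IsFreeCase(2, [[0, 0]], [1, 1, 5]): A returns true, B returns false
-- outside the precondition, e.g. on IsFreeCase(1, [[5, 1]], [5]): A returns False, B raises IndexError; on IsFreeCase(1, [], []): A returns True, B raises IndexError; on IsFreeCase(1, [[5]], [5, 0]): A returns False, B returns False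
import Mathlib
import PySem

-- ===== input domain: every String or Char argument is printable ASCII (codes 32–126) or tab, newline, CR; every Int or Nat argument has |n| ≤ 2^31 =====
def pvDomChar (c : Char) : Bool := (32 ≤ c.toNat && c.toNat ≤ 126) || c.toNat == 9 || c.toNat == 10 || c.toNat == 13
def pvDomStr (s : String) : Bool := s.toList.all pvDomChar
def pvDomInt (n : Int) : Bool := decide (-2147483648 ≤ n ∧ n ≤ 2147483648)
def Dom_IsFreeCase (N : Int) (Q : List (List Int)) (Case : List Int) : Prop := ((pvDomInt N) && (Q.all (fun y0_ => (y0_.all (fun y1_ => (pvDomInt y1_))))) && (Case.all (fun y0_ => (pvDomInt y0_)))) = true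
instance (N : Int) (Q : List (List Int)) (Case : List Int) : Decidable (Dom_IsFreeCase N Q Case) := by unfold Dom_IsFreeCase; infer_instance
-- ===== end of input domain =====

-- B replaces A's per-queen range(N) diagonal scan by one closed-form arithmetic test per queen (one pass, no inner loop).

-- ===== PORT A =====
-- literal port: the for-loop with its early 'return False' is ¬(Q.any …); q[0], Case[0] … via pyGet? (total via getD, in range under Pre_)
def IsFreeCase (N : Int) (Q : List (List Int)) (Case : List Int) : Bool :=
  !(Q.any fun q =>
    let q0 := (PySem.List.pyGet? q 0).getD 0
    let q1 := (PySem.List.pyGet? q 1).getD 0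
    (decide (q0 = (PySem.List.pyGet? Case 0).getD 0) ||
     decide (q1 = (PySem.List.pyGet? Case 1).getD 0)) ||
    (PySem.List.pyRange 0 N 1).any (fun i =>
      ([[q0 + i, q1 + i], [q0 + i, q1 - i], [q0 - i, q1 + i], [q0 - i, q1 - i]] : List (List Int)).contains Case))

-- ===== PORT B =====
-- literal port of Source B; Python's abs on ints is ported as Int.natAbs (cast back to Int for the < N comparison), exact on ints
def IsFreeCase_alt (N : Int) (Q : List (List Int)) (Case : List Int) : Bool :=
  let r := (PySem.List.pyGet? Case 0).getD 0
  let c := (PySem.List.pyGet? Case 1).getD 0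
  !(Q.any fun q =>
      let q0 := (PySem.List.pyGet? q 0).getD 0
      let q1 := (PySem.List.pyGet? q 1).getD 0
      decide (q0 = r) || decide (q1 = c) ||
      (decide ((r - q0).natAbs = (c - q1).natAbs) && decide (((r - q0).natAbs : Int) < N)))

-- ===== PRECONDITION & SPEC =====
-- Pre_ requires the square and every queen to carry at least two coordinates; outside it A raises IndexError,
-- except when an early row/column match returns False before the missing coordinate is touched (B unpacks the
-- square first and raises there, so those degenerate inputs are excluded).
def Pre_IsFreeCase (N : Int) (Q : List (List Int)) (Case : List Int) : Prop :=
  2 ≤ Case.length ∧ ∀ q ∈ Q, 2 ≤ q.length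
instance (N : Int) (Q : List (List Int)) (Case : List Int) : Decidable (Pre_IsFreeCase N Q Case) := by unfold Pre_IsFreeCase; infer_instance

def pvWitness_IsFreeCase : Int × List (List Int) × List Int := (4, [[0, 0], [2, 3]], [1, 3])

-- On Case lists longer than 2 whose first two coordinates are diagonally attacked (within distance N) but on no
-- queen's row or column, A returns True because its diagonal test compares the whole Case list against
-- two-element lists and can never match, while B tests the first two coordinates arithmetically and returns
-- False -- the intended answer for an attacked square.
def D_IsFreeCase (N : Int) (Q : List (List Int)) (Case : List Int) : Prop :=
  match Case with
  | r :: c :: _ :: _ =>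
      (∀ q ∈ Q, q.headI ≠ r ∧ q.tail.headI ≠ c) ∧
      ∃ q ∈ Q, |r - q.headI| = |c - q.tail.headI| ∧ |r - q.headI| < N
  | _ => False
instance (N : Int) (Q : List (List Int)) (Case : List Int) : Decidable (D_IsFreeCase N Q Case) := by unfold D_IsFreeCase; rcases Case with _ | ⟨r, _ | ⟨c, _ | ⟨d, t⟩⟩⟩ <;> infer_instance

def Spec_IsFreeCase (N : Int) (Q : List (List Int)) (Case : List Int) (out : Bool) : Prop := ¬ D_IsFreeCase N Q Case → out = IsFreeCase_alt N Q Case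
instance (N : Int) (Q : List (List Int)) (Case : List Int) (out : Bool) : Decidable (Spec_IsFreeCase N Q Case out) := by unfold Spec_IsFreeCase; infer_instance

def pvDiffWitness_IsFreeCase : Int × List (List Int) × List Int := (2, [[0, 0]], [1, 1, 5])
def pvDiffWitnessOut_IsFreeCase : Bool × Bool := (true, false)

-- ===== CLAIM (what is proved, stated in full; the proofs are below) =====
def Claim_unchanged_IsFreeCase : Prop := ∀ (N : Int) (Q : List (List Int)) (Case : List Int), Dom_IsFreeCase N Q Case → Pre_IsFreeCase N Q Case → Spec_IsFreeCase N Q Case (IsFreeCase N Q Case)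
def Claim_changed_IsFreeCase : Prop := Dom_IsFreeCase (pvDiffWitness_IsFreeCase.1) (pvDiffWitness_IsFreeCase.2.1) (pvDiffWitness_IsFreeCase.2.2) ∧ Pre_IsFreeCase (pvDiffWitness_IsFreeCase.1) (pvDiffWitness_IsFreeCase.2.1) (pvDiffWitness_IsFreeCase.2.2) ∧ D_IsFreeCase (pvDiffWitness_IsFreeCase.1) (pvDiffWitness_IsFreeCase.2.1) (pvDiffWitness_IsFreeCase.2.2) ∧ IsFreeCase (pvDiffWitness_IsFreeCase.1) (pvDiffWitness_IsFreeCase.2.1) (pvDiffWitness_IsFreeCase.2.2) = pvDiffWitnessOut_IsFreeCase.1 ∧ IsFreeCase_alt (pvDiffWitness_IsFreeCase.1) (pvDiffWitness_IsFreeCase.2.1) (pvDiffWitness_IsFreeCase.2.2) = pvDiffWitnessOut_IsFreeCase.2 ∧ pvDiffWitnessOut_IsFreeCase.1 ≠ pvDiffWitnessOut_IsFreeCase.2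
def Claim_exact_IsFreeCase : Prop := ∀ (N : Int) (Q : List (List Int)) (Case : List Int), Dom_IsFreeCase N Q Case → Pre_IsFreeCase N Q Case → D_IsFreeCase N Q Case → IsFreeCase N Q Case ≠ IsFreeCase_alt N Q Case

-- ===== LEMMAS AND PROOFS =====

-- some queen attacks square (r, c) along its row or column
def rowcolHit (Q : List (List Int)) (r c : Int) : Prop :=
  ∃ q ∈ Q, q.headI = r ∨ q.tail.headI = c

-- some queen attacks square (r, c) along a diagonal at distance < N
def diagHit (N : Int) (Q : List (List Int)) (r c : Int) : Prop :=
  ∃ q ∈ Q, |r - q.headI| = |c - q.tail.headI| ∧ |r - q.headI| < N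

lemma D_iff (N : Int) (Q : List (List Int)) (r c d : Int) (t : List Int) :
    D_IsFreeCase N Q (r :: c :: d :: t) ↔ ¬ rowcolHit Q r c ∧ diagHit N Q r c := by
  unfold D_IsFreeCase rowcolHit diagHit
  constructor
  · rintro ⟨h1, h2⟩
    refine ⟨?_, h2⟩
    rintro ⟨q, hq, h | h⟩
    · exact (h1 q hq).1 h
    · exact (h1 q hq).2 h
  · rintro ⟨h1, h2⟩
    refine ⟨?_, h2⟩
    intro q hq
    exact ⟨fun h => h1 ⟨q, hq, Or.inl h⟩, fun h => h1 ⟨q, hq, Or.inr h⟩⟩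

-- reading the first two elements of a list of length ≥ 2 with Python indexing
lemma pyGet_zero_of_len (l : List Int) (h : 2 ≤ l.length) :
    PySem.List.pyGet? l 0 = some (l.headI) := by
  obtain (_ | ⟨a, _ | ⟨b, t⟩⟩) := l
  · simp at h
  · simp at h
  · have hnn : (0 : Int) ≤ (t.length : Int) + 1 := by positivity
    simp [PySem.List.pyGet?, PySem.List.pyIdx?, hnn]

lemma pyGet_one_of_len (l : List Int) (h : 2 ≤ l.length) :
    PySem.List.pyGet? l 1 = some (l.tail.headI) := by
  obtain (_ | ⟨a, _ | ⟨b, t⟩⟩) := l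
  · simp at h
  · simp at h
  · simp [PySem.List.pyGet?, PySem.List.pyIdx?]

-- A's inner range(N) scan over the four candidate squares equals B's closed-form diagonal test, for a 2-element Case
lemma diag_scan_eq (N q0 q1 r c : Int) :
    ((PySem.List.pyRange 0 N 1).any (fun i =>
      ([[q0 + i, q1 + i], [q0 + i, q1 - i], [q0 - i, q1 + i], [q0 - i, q1 - i]] : List (List Int)).contains [r, c]))
    = (decide ((r - q0).natAbs = (c - q1).natAbs) && decide (((r - q0).natAbs : Int) < N)) := by
  rw [Bool.eq_iff_iff]
  simp only [List.any_eq_true, PySem.List.mem_pyRange_one, List.contains_eq_mem, List.mem_cons,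
    List.not_mem_nil, or_false, List.cons.injEq, and_true, decide_eq_true_eq, Bool.and_eq_true]
  constructor
  · rintro ⟨i, ⟨h0, hN⟩, h⟩
    rcases h with ⟨h1, h2⟩ | ⟨h1, h2⟩ | ⟨h1, h2⟩ | ⟨h1, h2⟩ <;> omega
  · rintro ⟨h1, h2⟩
    exact ⟨((r - q0).natAbs : Int), ⟨by positivity, h2⟩, by omega⟩

-- for a Case list whose length is not 2, A's diagonal membership test can never fire
lemma diag_scan_false (N q0 q1 : Int) (Case : List Int) (h : Case.length ≠ 2) :
    ((PySem.List.pyRange 0 N 1).any (fun i =>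
      ([[q0 + i, q1 + i], [q0 + i, q1 - i], [q0 - i, q1 + i], [q0 - i, q1 - i]] : List (List Int)).contains Case))
    = false := by
  rw [Bool.eq_false_iff]
  intro hany
  rw [List.any_eq_true] at hany
  obtain ⟨i, _, hc⟩ := hany
  rw [List.contains_eq_mem, decide_eq_true_eq] at hc
  simp only [List.mem_cons, List.not_mem_nil, or_false] at hc
  rcases hc with rfl | rfl | rfl | rfl <;> simp_all

lemma any_congr_mem {α : Type} (l : List α) (f g : α → Bool) (h : ∀ x ∈ l, f x = g x) :
    l.any f = l.any g := by
  induction l with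
  | nil => rfl
  | cons a t ih =>
    simp only [List.any_cons, h a List.mem_cons_self,
      ih (fun x hx => h x (List.mem_cons_of_mem a hx))]

-- B returns False exactly when some queen hits the square by row/column or by a diagonal within distance N
lemma alt_eq_false_iff (N : Int) (Q : List (List Int)) (Case : List Int)
    (hC : 2 ≤ Case.length) (hQ : ∀ q ∈ Q, 2 ≤ q.length) :
    IsFreeCase_alt N Q Case = false ↔
      rowcolHit Q (Case.headI) (Case.tail.headI) ∨ diagHit N Q (Case.headI) (Case.tail.headI) := by
  unfold IsFreeCase_alt rowcolHit diagHit
  rw [pyGet_zero_of_len Case hC, pyGet_one_of_len Case hC]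
  simp only [Option.getD_some, Bool.not_eq_false', List.any_eq_true]
  constructor
  · rintro ⟨q, hq, hcond⟩
    rw [pyGet_zero_of_len q (hQ q hq), pyGet_one_of_len q (hQ q hq)] at hcond
    simp only [Option.getD_some, Bool.or_eq_true, Bool.and_eq_true, decide_eq_true_eq] at hcond
    rcases hcond with (h | h) | h
    · exact Or.inl ⟨q, hq, Or.inl h⟩
    · exact Or.inl ⟨q, hq, Or.inr h⟩
    · exact Or.inr ⟨q, hq, by constructor <;> simp only [Int.abs_eq_natAbs] <;> omega⟩
  · rintro (⟨q, hq, h⟩ | ⟨q, hq, h⟩) <;>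
      refine ⟨q, hq, ?_⟩ <;>
      rw [pyGet_zero_of_len q (hQ q hq), pyGet_one_of_len q (hQ q hq)] <;>
      simp only [Option.getD_some, Bool.or_eq_true, Bool.and_eq_true, decide_eq_true_eq]
    · exact Or.inl h
    · refine Or.inr ?_
      obtain ⟨h1, h2⟩ := h
      simp only [Int.abs_eq_natAbs] at h1 h2
      constructor <;> omega

-- A returns False exactly on a row/column hit when Case is longer than 2 (its diagonal test is dead then)
lemma a_eq_false_iff_long (N : Int) (Q : List (List Int)) (Case : List Int)
    (hC : 2 ≤ Case.length) (h3 : Case.length ≠ 2) (hQ : ∀ q ∈ Q, 2 ≤ q.length) :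
    IsFreeCase N Q Case = false ↔ rowcolHit Q (Case.headI) (Case.tail.headI) := by
  unfold IsFreeCase rowcolHit
  simp only [Bool.not_eq_false', List.any_eq_true]
  constructor
  · rintro ⟨q, hq, hcond⟩
    rw [pyGet_zero_of_len q (hQ q hq), pyGet_one_of_len q (hQ q hq),
      pyGet_zero_of_len Case hC, pyGet_one_of_len Case hC, diag_scan_false N _ _ Case h3] at hcond
    simp only [Option.getD_some, Bool.or_false, Bool.or_eq_true, decide_eq_true_eq] at hcond
    exact ⟨q, hq, hcond⟩
  · rintro ⟨q, hq, h⟩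
    refine ⟨q, hq, ?_⟩
    rw [pyGet_zero_of_len q (hQ q hq), pyGet_one_of_len q (hQ q hq),
      pyGet_zero_of_len Case hC, pyGet_one_of_len Case hC, diag_scan_false N _ _ Case h3]
    simp only [Option.getD_some, Bool.or_false, Bool.or_eq_true, decide_eq_true_eq]
    exact h

-- on a 2-element Case the two programs agree outright
lemma eq_of_len_two (N : Int) (Q : List (List Int)) (r c : Int)
    (hQ : ∀ q ∈ Q, 2 ≤ q.length) :
    IsFreeCase N Q [r, c] = IsFreeCase_alt N Q [r, c] := by
  unfold IsFreeCase IsFreeCase_alt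
  congr 1
  apply any_congr_mem
  intro q hq
  have h2 := hQ q hq
  obtain (_ | ⟨q0, _ | ⟨q1, rest⟩⟩) := q
  · simp at h2
  · simp at h2
  · have hnn : (0 : Int) ≤ (rest.length : Int) + 1 := by positivity
    have e0 : PySem.List.pyGet? (q0 :: q1 :: rest) 0 = some q0 := by
      simp [PySem.List.pyGet?, PySem.List.pyIdx?, hnn]
    have e1 : PySem.List.pyGet? (q0 :: q1 :: rest) 1 = some q1 := by
      simp [PySem.List.pyGet?, PySem.List.pyIdx?]
    simp only [e0, e1, Option.getD_some]
    rw [diag_scan_eq]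
    simp [PySem.List.pyGet?, PySem.List.pyIdx?]

-- ===== VERDICT (by name: the statement is the Claim_ definition above) =====
theorem IsFreeCase_spec : Claim_unchanged_IsFreeCase := by
  intro N Q Case _ hPre hnD
  obtain ⟨hC, hQ⟩ := hPre
  rcases Case with _ | ⟨r, _ | ⟨c, _ | ⟨d, t⟩⟩⟩
  · simp at hC
  · simp at hC
  · exact eq_of_len_two N Q r c hQ
  · rw [D_iff] at hnD
    have hlen : (r :: c :: d :: t).length ≠ 2 := by simp
    by_cases hrc : rowcolHit Q r c
    · rw [(a_eq_false_iff_long N Q _ hC hlen hQ).mpr hrc,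
        Eq.comm, (alt_eq_false_iff N Q _ hC hQ).mpr (Or.inl hrc)]
    · have hnd : ¬ diagHit N Q r c := fun hd => hnD ⟨hrc, hd⟩
      have hA : IsFreeCase N Q (r :: c :: d :: t) ≠ false :=
        fun h => hrc ((a_eq_false_iff_long N Q _ hC hlen hQ).mp h)
      have hB : IsFreeCase_alt N Q (r :: c :: d :: t) ≠ false :=
        fun h => ((alt_eq_false_iff N Q _ hC hQ).mp h).elim hrc hnd
      rw [Bool.ne_false_iff] at hA hB
      rw [hA, hB]

theorem IsFreeCase_changed : Claim_changed_IsFreeCase := by unfold Claim_changed_IsFreeCase; decide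

theorem IsFreeCase_tight : Claim_exact_IsFreeCase := by
  intro N Q Case _ hPre hD
  obtain ⟨hC, hQ⟩ := hPre
  rcases Case with _ | ⟨r, _ | ⟨c, _ | ⟨d, t⟩⟩⟩
  · exact absurd hD (by unfold D_IsFreeCase; simp)
  · exact absurd hD (by unfold D_IsFreeCase; simp)
  · exact absurd hD (by unfold D_IsFreeCase; simp)
  · rw [D_iff] at hD
    obtain ⟨hrc, hd⟩ := hD
    have hB : IsFreeCase_alt N Q (r :: c :: d :: t) = false :=
      (alt_eq_false_iff N Q _ hC hQ).mpr (Or.inr hd)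
    have hA : IsFreeCase N Q (r :: c :: d :: t) ≠ false := by
      rw [Ne, a_eq_false_iff_long N Q _ hC (by simp) hQ]
      exact hrc
    rw [hB]
    exact hA
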